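-- pv_equiv track=rewrite | github.com/frankeverdij/rle2blk | rle2blk.py | make_braille
-- ===== SOURCE A (Python) =====
-- def make_braille(bitmap_raw,maxwidth):
--     """Turn bitmap list into unicode braille chararacters"""
--
--     width = len(bitmap_raw[0])
--     height = len(bitmap_raw)
--     bitmap = [[1 if x == 1 else 0 for x in sublist] for sublist in bitmap_raw]
--
--     blk_string = ""
--     braille = []
--     for i in range(0,height,4) :
--         for j in range(0,width,2) :
--             key = bitmap[i][j]
--             key += 8 * bitmap[i][j+1] if j+1<width else 0
--             if (i+1<height):
--                 key += 2 * bitmap[i+1][j]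
--                 key += 16 * bitmap[i+1][j+1] if j+1<width else 0
--             if (i+2<height):
--                 key += 4 * bitmap[i+2][j]
--                 key += 32 * bitmap[i+2][j+1] if j+1<width else 0
--             if (i+3<height):
--                 key += 64 * bitmap[i+3][j]
--                 key += 128 * bitmap[i+3][j+1] if j+1<width else 0
--             braille.append(chr(0x2800+key))
--         braille.append('\n')
--     blk_string += "".join(braille)
--     return blk_string
-- ===== SOURCE B (Python) =====
-- def make_braille(bitmap_raw, maxwidth):
--     """Turn bitmap list into unicode braille characters (band/column-vector version)"""
--     width = len(bitmap_raw[0])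
--     cols = (width + 1) // 2
--     W = [(1, 8), (2, 16), (4, 32), (64, 128)]
--     lines = []
--     for b in range(0, len(bitmap_raw), 4):
--         band = bitmap_raw[b:b+4]
--         keys = [0] * cols
--         for (w0, w1), row in zip(W, band):
--             contrib = [(w0 if row[2 * c] == 1 else 0)
--                        + ((w1 if row[2 * c + 1] == 1 else 0) if 2 * c + 1 < width else 0)
--                        for c in range(cols)]
--             keys = [k + d for k, d in zip(keys, contrib)]
--         lines.append(''.join(chr(0x2800 + k) for k in keys) + '\n')
--     return ''.join(lines)
-- ===== Notes on version B (the rewrite author's own statement) =====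
-- stated objective: alternative
-- what changed: A gathers each braille cell by eight unrolled, individually guarded additions indexed into a pre-normalized copy of the whole bitmap; B instead slices the bitmap into 4-row bands and builds each output line by elementwise addition of per-row contribution vectors driven by a weight table, so the bit weights come from data rather than unrolled code.
import Mathlib
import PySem

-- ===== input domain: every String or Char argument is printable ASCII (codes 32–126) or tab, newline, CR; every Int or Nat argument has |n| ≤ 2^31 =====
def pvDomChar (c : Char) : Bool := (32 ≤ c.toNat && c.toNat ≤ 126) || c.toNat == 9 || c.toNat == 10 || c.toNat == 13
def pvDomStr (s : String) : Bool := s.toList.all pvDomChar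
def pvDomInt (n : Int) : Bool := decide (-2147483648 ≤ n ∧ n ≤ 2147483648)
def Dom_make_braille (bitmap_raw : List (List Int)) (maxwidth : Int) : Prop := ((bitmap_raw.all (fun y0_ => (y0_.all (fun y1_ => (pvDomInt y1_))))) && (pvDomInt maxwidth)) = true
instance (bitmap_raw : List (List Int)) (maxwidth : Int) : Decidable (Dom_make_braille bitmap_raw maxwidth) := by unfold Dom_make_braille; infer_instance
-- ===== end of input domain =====

-- B replaces A's per-cell gather (eight unrolled guarded additions per braille cell) by a per-band sweep:
-- it slices the bitmap into 4-row bands and accumulates a vector of cell keys by elementwise addition of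
-- per-row contribution vectors taken from a weight table (objective: alternative; same asymptotic cost).

-- ===== PORT A =====
def make_braille (bitmap_raw : List (List Int)) (maxwidth : Int) : String :=
  let width : Int := (PySem.List.pyGetD bitmap_raw 0 []).length
  let height : Int := bitmap_raw.length
  let bitmap : List (List Int) := bitmap_raw.map (fun sublist => sublist.map (fun x => if x = 1 then 1 else 0))
  -- bm r c = bitmap[r][c] (indexing shorthand; in range for every access under Pre_)
  let bm : Int → Int → Int := fun r c => PySem.List.pyGetD (PySem.List.pyGetD bitmap r []) c 0
  let braille : List Char :=
    (PySem.List.pyRange 0 height 4).foldl (fun acc i =>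
      ((PySem.List.pyRange 0 width 2).foldl (fun acc2 j =>
          let key := bm i j
          let key := key + (if j + 1 < width then 8 * bm i (j+1) else 0)
          let key := if i + 1 < height then
              key + 2 * bm (i+1) j + (if j + 1 < width then 16 * bm (i+1) (j+1) else 0)
            else key
          let key := if i + 2 < height then
              key + 4 * bm (i+2) j + (if j + 1 < width then 32 * bm (i+2) (j+1) else 0)
            else key
          let key := if i + 3 < height then
              key + 64 * bm (i+3) j + (if j + 1 < width then 128 * bm (i+3) (j+1) else 0)
            else key
          acc2 ++ [Char.ofNat (0x2800 + key).toNat]) acc) ++ ['\n']) []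
  String.ofList braille

-- ===== PORT B =====
def make_braille_alt (bitmap_raw : List (List Int)) (maxwidth : Int) : String :=
  let width : Int := (PySem.List.pyGetD bitmap_raw 0 []).length
  let cols : Int := PySem.Int.floordiv (width + 1) 2
  let W : List (Int × Int) := [(1, 8), (2, 16), (4, 32), (64, 128)]
  let lines : List (List Char) :=
    (PySem.List.pyRange 0 bitmap_raw.length 4).foldl (fun ls b =>
      let band := PySem.List.slice bitmap_raw (some b) (some (b + 4))
      let keys0 : List Int := List.replicate cols.toNat 0
      let keys := (W.zip band).foldl (fun keys wr =>
        (keys.zip ((PySem.List.pyRange 0 cols 1).map (fun c =>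
            (if PySem.List.pyGetD wr.2 (2*c) 0 = 1 then wr.1.1 else 0) +
            (if 2*c + 1 < width then (if PySem.List.pyGetD wr.2 (2*c + 1) 0 = 1 then wr.1.2 else 0) else 0)))).map
          (fun p => p.1 + p.2)) keys0
      ls ++ [keys.map (fun k => Char.ofNat (0x2800 + k).toNat) ++ ['\n']]) []
  String.ofList lines.flatten

-- ===== PRECONDITION & SPEC =====
-- Pre_ excludes exactly the inputs on which A raises IndexError: an empty bitmap (bitmap_raw[0]) and
-- bitmaps with a row shorter than the first row (row indexing up to width-1).
def Pre_make_braille (bitmap_raw : List (List Int)) (maxwidth : Int) : Prop :=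
  bitmap_raw ≠ [] ∧ ∀ row ∈ bitmap_raw, (bitmap_raw.headD []).length ≤ row.length
instance (bitmap_raw : List (List Int)) (maxwidth : Int) : Decidable (Pre_make_braille bitmap_raw maxwidth) := by unfold Pre_make_braille; infer_instance

def pvWitness_make_braille : List (List Int) × Int := ([[1, 0], [0, 1], [1, 1], [0, 0], [1, 2]], 10)

def Spec_make_braille (bitmap_raw : List (List Int)) (maxwidth : Int) (out : String) : Prop := out = make_braille_alt bitmap_raw maxwidth
instance (bitmap_raw : List (List Int)) (maxwidth : Int) (out : String) : Decidable (Spec_make_braille bitmap_raw maxwidth out) := by unfold Spec_make_braille; infer_instance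

-- ===== CLAIM (what is proved, stated in full; the proofs are below) =====
def Claim_equal_make_braille : Prop := ∀ (bitmap_raw : List (List Int)) (maxwidth : Int), Dom_make_braille bitmap_raw maxwidth → Pre_make_braille bitmap_raw maxwidth → Spec_make_braille bitmap_raw maxwidth (make_braille bitmap_raw maxwidth)

-- ===== LEMMAS AND PROOFS =====
-- A's normalized-bitmap lookups expressed over the raw bitmap
lemma norm_outer (xss : List (List Int)) (i : Int) :
    PySem.List.pyGetD (xss.map (fun sublist => sublist.map (fun x => if x = 1 then (1:Int) else 0))) i []
    = (PySem.List.pyGetD xss i []).map (fun x => if x = 1 then (1:Int) else 0) := by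
  simpa using PySem.List.pyGetD_map (fun sublist => sublist.map (fun x => if x = 1 then (1:Int) else 0)) xss i []

lemma norm_inner (xs : List Int) (i : Int) :
    PySem.List.pyGetD (xs.map (fun x => if x = 1 then (1:Int) else 0)) i 0
    = (if PySem.List.pyGetD xs i 0 = 1 then 1 else 0) := by
  simpa using PySem.List.pyGetD_map (fun x => if x = 1 then (1:Int) else 0) xs i 0

-- B's loop 'keys = [k + d for k, d in zip(keys, contrib)]' pushed inside: elementwise folds
lemma fold_zip_add {γ : Type} (term : γ → Int → Int) (ps : List γ) (l : List Int) (init : Int → Int) :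
    ps.foldl (fun keys wr => ((keys.zip (l.map (fun c => term wr c))).map (fun p => p.1 + p.2)))
      (l.map init)
    = l.map (fun c => ps.foldl (fun a wr => a + term wr c) (init c)) := by
  induction ps generalizing init with
  | nil => rfl
  | cons p ps ih =>
    simp only [List.foldl_cons, List.zip_map', List.map_map]
    simpa using ih (fun c => init c + term p c)

lemma pyGetD_drop_at {α : Type} (xs : List α) (i : Int) (d : α) (dy : Nat) (tl : List α)
    (h0 : 0 ≤ i) (hdrop : xs.drop i.toNat = tl) (hdy : dy < tl.length) :
    PySem.List.pyGetD xs (i + dy) d = tl[dy] := by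
  subst hdrop
  have hl : (xs.drop i.toNat).length = xs.length - i.toNat := List.length_drop
  have hx : i.toNat + dy < xs.length := by omega
  rw [PySem.List.pyGetD_eq_getElem xs d (by omega) (by omega)]
  have hidx : (i + (dy:Int)).toNat = i.toNat + dy := by omega
  simp only [List.getElem_drop]
  exact getElem_congr rfl hidx (by omega)

-- ===== VERDICT (by name: the statement is the Claim_ definition above) =====
theorem make_braille_spec : Claim_equal_make_braille := by
  intro bm mw _ hpre
  show make_braille bm mw = make_braille_alt bm mw
  unfold make_braille make_braille_alt
  simp only [PySem.List.foldl_append_singleton_eq_map, List.append_assoc,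
    PySem.List.foldl_append_eq_flatMap, List.nil_append, ← List.flatMap_def,
    norm_outer, norm_inner]
  apply congrArg
  apply List.flatMap_congr
  intro i hi
  rw [PySem.List.mem_pyRange_iff_of_pos (by norm_num)] at hi
  obtain ⟨hi0, hih, -⟩ := hi

  -- band = bitmap_raw[i:i+4]
  have hslice : PySem.List.slice bm (some i) (some (i + 4)) = (bm.drop i.toNat).take 4 := by
    rw [PySem.List.slice_toNat bm hi0 (by omega)]
    congr 1
    omega
  rw [hslice]
  have hrepl : List.replicate (PySem.Int.floordiv ((((PySem.List.pyGetD bm 0 []).length:Int)) + 1) 2).toNat (0:Int)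
      = (PySem.List.pyRange 0 (PySem.Int.floordiv ((((PySem.List.pyGetD bm 0 []).length:Int)) + 1) 2) 1).map (fun _ => 0) := by
    rw [List.map_const', PySem.List.length_pyRange_one]
    norm_num
  rw [hrepl, fold_zip_add]
  rw [PySem.List.pyRange_of_pos 0 (((PySem.List.pyGetD bm 0 []).length : Int)) (by norm_num : (0:Int) < 2),
      PySem.List.pyRange_one 0 (PySem.Int.floordiv ((((PySem.List.pyGetD bm 0 []).length:Int)) + 1) 2)]
  have hN : (if (0:Int) < (((PySem.List.pyGetD bm 0 []).length:Int)) then (((((PySem.List.pyGetD bm 0 []).length:Int)) - 0 + 2 - 1) / 2).toNat else 0)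
      = (PySem.Int.floordiv ((((PySem.List.pyGetD bm 0 []).length:Int)) + 1) 2).toNat := by
    rw [PySem.Int.floordiv_eq_ediv_of_pos (by norm_num : (0:Int) < 2)]
    split_ifs with h
    · congr 2
      ring
    · have h0 : ((PySem.List.pyGetD bm 0 []).length:Int) = 0 := by omega
      rw [h0]
      decide
  rw [hN]
  simp only [List.map_map]
  have hdl := List.length_drop (l := bm) (i := i.toNat)
  rcases htl : bm.drop i.toNat with _ | ⟨r0, _ | ⟨r1, _ | ⟨r2, _ | ⟨r3, rest⟩⟩⟩⟩
  · rw [htl] at hdl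
    simp only [List.length_nil] at hdl
    omega
  case cons.nil =>
    have hL : bm.length - i.toNat = 1 := by rw [htl] at hdl; simp only [List.length_cons, List.length_nil] at hdl; omega
    have g1 : ¬ (i + 1 < (bm.length:Int)) := by omega
    have g2 : ¬ (i + 2 < (bm.length:Int)) := by omega
    have g3 : ¬ (i + 3 < (bm.length:Int)) := by omega
    have e0 : PySem.List.pyGetD bm i [] = r0 := by
      simpa using pyGetD_drop_at bm i [] 0 _ hi0 htl (by simp)
    simp only [List.take, List.zip_cons_cons, List.zip_nil_right, List.foldl_cons, List.foldl_nil,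
      if_neg g1, if_neg g2, if_neg g3, e0]
    refine congrArg (· ++ ['\n']) ?_
    refine List.map_congr_left ?_
    intro k hk
    simp only [Function.comp_def, zero_add, mul_ite, mul_one, mul_zero]
  case cons.cons.nil =>
    have hL : bm.length - i.toNat = 2 := by rw [htl] at hdl; simp only [List.length_cons, List.length_nil] at hdl; omega
    have g1 : (i + 1 < (bm.length:Int)) := by omega
    have g2 : ¬ (i + 2 < (bm.length:Int)) := by omega
    have g3 : ¬ (i + 3 < (bm.length:Int)) := by omega
    have e0 : PySem.List.pyGetD bm i [] = r0 := by
      simpa using pyGetD_drop_at bm i [] 0 _ hi0 htl (by simp)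
    have e1 : PySem.List.pyGetD bm (i + 1) [] = r1 := by
      simpa using pyGetD_drop_at bm i [] 1 _ hi0 htl (by simp)
    simp only [List.take, List.zip_cons_cons, List.zip_nil_right, List.foldl_cons, List.foldl_nil,
      if_pos g1, if_neg g2, if_neg g3, e0, e1]
    refine congrArg (· ++ ['\n']) ?_
    refine List.map_congr_left ?_
    intro k hk
    simp only [Function.comp_def, zero_add, mul_ite, mul_one, mul_zero]
    all_goals refine congrArg Char.ofNat (congrArg Int.toNat ?_)
    all_goals ring
  case cons.cons.cons.nil =>
    have hL : bm.length - i.toNat = 3 := by rw [htl] at hdl; simp only [List.length_cons, List.length_nil] at hdl; omega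
    have g1 : (i + 1 < (bm.length:Int)) := by omega
    have g2 : (i + 2 < (bm.length:Int)) := by omega
    have g3 : ¬ (i + 3 < (bm.length:Int)) := by omega
    have e0 : PySem.List.pyGetD bm i [] = r0 := by
      simpa using pyGetD_drop_at bm i [] 0 _ hi0 htl (by simp)
    have e1 : PySem.List.pyGetD bm (i + 1) [] = r1 := by
      simpa using pyGetD_drop_at bm i [] 1 _ hi0 htl (by simp)
    have e2 : PySem.List.pyGetD bm (i + 2) [] = r2 := by
      simpa using pyGetD_drop_at bm i [] 2 _ hi0 htl (by simp)
    simp only [List.take, List.zip_cons_cons, List.zip_nil_right, List.foldl_cons, List.foldl_nil,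
      if_pos g1, if_pos g2, if_neg g3, e0, e1, e2]
    refine congrArg (· ++ ['\n']) ?_
    refine List.map_congr_left ?_
    intro k hk
    simp only [Function.comp_def, zero_add, mul_ite, mul_one, mul_zero]
    all_goals refine congrArg Char.ofNat (congrArg Int.toNat ?_)
    all_goals ring
  case cons.cons.cons.cons =>
    have hL : bm.length - i.toNat = 4 + rest.length := by
      rw [htl] at hdl
      simp only [List.length_cons] at hdl
      omega
    have g1 : (i + 1 < (bm.length:Int)) := by omega
    have g2 : (i + 2 < (bm.length:Int)) := by omega
    have g3 : (i + 3 < (bm.length:Int)) := by omega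
    have e0 : PySem.List.pyGetD bm i [] = r0 := by
      simpa using pyGetD_drop_at bm i [] 0 _ hi0 htl (by simp)
    have e1 : PySem.List.pyGetD bm (i + 1) [] = r1 := by
      simpa using pyGetD_drop_at bm i [] 1 _ hi0 htl (by simp)
    have e2 : PySem.List.pyGetD bm (i + 2) [] = r2 := by
      simpa using pyGetD_drop_at bm i [] 2 _ hi0 htl (by simp)
    have e3 : PySem.List.pyGetD bm (i + 3) [] = r3 := by
      simpa using pyGetD_drop_at bm i [] 3 _ hi0 htl (by simp)
    simp only [List.take, List.zip_cons_cons, List.zip_nil_right, List.foldl_cons, List.foldl_nil,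
      if_pos g1, if_pos g2, if_pos g3, e0, e1, e2, e3]
    refine congrArg (· ++ ['\n']) ?_
    refine List.map_congr_left ?_
    intro k hk
    simp only [Function.comp_def, zero_add, mul_ite, mul_one, mul_zero]
    all_goals refine congrArg Char.ofNat (congrArg Int.toNat ?_)
    all_goals ring
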